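-- pv_equiv track=rewrite | github.com/AK-1121/careercup_com | anagram.py | a_is_anagram_in_b
-- ===== SOURCE A (Python) =====
-- from collections import Counter
--
-- compare = lambda x, y: Counter(x) == Counter(y)
--
-- def a_is_anagram_in_b(a, b):
--     len_a = len(a)
--     a_list = list(a)
--     flag = False
--     for i in range(0, len(b)-len(a)+1):
--         if compare(a_list, list(b[i:i+len_a])):
--             flag = True
--     return flag
-- ===== SOURCE B (Python) =====
-- from collections import Counter
--
-- def a_is_anagram_in_b(a, b):
--     n, m = len(a), len(b)
--     if n > m:
--         return False
--     need = Counter(a)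
--     window = Counter(b[:n])
--     if window == need:
--         return True
--     for i in range(n, m):
--         window[b[i]] += 1
--         window[b[i - n]] -= 1
--         if window[b[i - n]] == 0:
--             del window[b[i - n]]
--         if window == need:
--             return True
--     return False
-- ===== Notes on version B (the rewrite author's own statement) =====
-- stated objective: alternative
-- what changed: Replaces A's rebuild-a-Counter-for-every-window scan (no early exit) with a single sliding-window counter updated incrementally per step with early return; measured timing on the generated inputs showed no >=1.5x speedup, so no speed is claimed.
import Mathlib
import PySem

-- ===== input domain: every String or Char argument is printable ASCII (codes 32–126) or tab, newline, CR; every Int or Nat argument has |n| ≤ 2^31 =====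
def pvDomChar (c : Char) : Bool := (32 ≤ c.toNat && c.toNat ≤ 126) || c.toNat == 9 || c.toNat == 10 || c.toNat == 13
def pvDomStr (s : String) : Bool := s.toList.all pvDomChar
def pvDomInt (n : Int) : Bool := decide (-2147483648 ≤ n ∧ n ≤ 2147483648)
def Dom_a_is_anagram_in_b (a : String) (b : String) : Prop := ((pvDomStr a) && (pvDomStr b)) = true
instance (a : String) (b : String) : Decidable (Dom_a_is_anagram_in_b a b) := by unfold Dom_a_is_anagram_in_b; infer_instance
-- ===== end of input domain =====

-- B replaces A's rebuild-a-Counter-for-every-window scan with one sliding-window counter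
-- updated incrementally and an early return (objective: alternative algorithm).

-- ===== PORT A =====
-- compare = lambda x, y: Counter(x) == Counter(y): Counter equality is multiset equality
def pyCompare (x y : List Char) : Bool := decide ((↑x : Multiset Char) = (↑y : Multiset Char))

def a_is_anagram_in_b (a : String) (b : String) : Bool :=
  let len_a : Int := PySem.Str.len a
  let a_list : List Char := a.toList
  (PySem.List.pyRange 0 (PySem.Str.len b - len_a + 1) 1).foldl
    (fun flag i =>
      if pyCompare a_list (PySem.List.slice b.toList (some i) (some (i + len_a))) then true
      else flag)
    false

-- ===== PORT B =====
-- the for-loop of Source B: pairs (b[i], b[i-n]) for i in range(n, m); the Counter with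
-- += / -= / delete-at-zero is exactly a multiset with cons / erase (counts stay ≥ 0)
def altGo (need : Multiset Char) : List (Char × Char) → Multiset Char → Bool
  | [], _ => false
  | (cin, cout) :: rest, window =>
      let w := (cin ::ₘ window).erase cout
      if w = need then true else altGo need rest w

def a_is_anagram_in_b_alt (a : String) (b : String) : Bool :=
  let n := a.toList.length
  let l := b.toList
  if n > l.length then false
  else
    let need : Multiset Char := ↑a.toList
    let window : Multiset Char := ↑(l.take n)
    if window = need then true
    else altGo need ((l.drop n).zip l) window

-- ===== PRECONDITION & SPEC =====
def Spec_a_is_anagram_in_b (a : String) (b : String) (out : Bool) : Prop := out = a_is_anagram_in_b_alt a b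
instance (a : String) (b : String) (out : Bool) : Decidable (Spec_a_is_anagram_in_b a b out) := by unfold Spec_a_is_anagram_in_b; infer_instance

-- ===== CLAIM (what is proved, stated in full; the proofs are below) =====
def Claim_equal_a_is_anagram_in_b : Prop := ∀ (a : String) (b : String), Dom_a_is_anagram_in_b a b → Spec_a_is_anagram_in_b a b (a_is_anagram_in_b a b)

-- ===== LEMMAS AND PROOFS =====

-- A's flag loop is List.any
lemma foldl_orflag {α : Type} (p : α → Bool) (xs : List α) (flag : Bool) :
    xs.foldl (fun f i => if p i then true else f) flag = (flag || xs.any p) := by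
  induction xs generalizing flag with
  | nil => simp
  | cons x xs ih =>
      simp only [List.foldl_cons, List.any_cons, ih]
      by_cases h : p x <;> simp [h]

-- sliding one step: push b[n+j], drop b[j]
lemma window_step (l : List Char) (n j : Nat) (h : n + j < l.length) :
    ((l[n+j]'(by omega) ::ₘ (↑((l.drop j).take n) : Multiset Char)).erase (l[j]'(by omega)))
      = ↑((l.drop (j+1)).take n) := by
  cases n with
  | zero =>
      simp
  | succ n' =>
      have hd : l.drop j = l[j]'(by omega) :: l.drop (j+1) :=
        List.drop_eq_getElem_cons (by omega)
      have hlen : n' < (l.drop (j+1)).length := by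
        simp [List.length_drop]; omega
      have htake : (l.drop (j+1)).take (n'+1)
          = (l.drop (j+1)).take n' ++ [(l.drop (j+1))[n']'hlen] := by
        rw [List.take_add_one]
        simp [List.getElem?_eq_getElem hlen]
      have hget : (l.drop (j+1))[n']'hlen = l[n'+1+j]'(by omega) := by
        simp only [List.getElem_drop]
        congr 1
        omega
      rw [hd]
      simp only [List.take_succ_cons, ← Multiset.cons_coe]
      rw [Multiset.cons_swap, Multiset.erase_cons_head, htake, hget, Multiset.cons_coe]
      exact Multiset.coe_eq_coe.mpr (List.perm_append_singleton _ _).symm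

lemma altGo_spec (l : List Char) (need : Multiset Char) (n : Nat) :
    ∀ (t j : Nat), l.length ≤ n + j + t →
    (altGo need ((l.drop (n+j)).zip (l.drop j)) (↑((l.drop j).take n)) = true
      ↔ ∃ k, j < k ∧ k + n ≤ l.length ∧ (↑((l.drop k).take n) : Multiset Char) = need) := by
  intro t
  induction t with
  | zero =>
      intro j hj
      have h1 : l.drop (n+j) = [] := by
        apply List.drop_eq_nil_of_le; omega
      rw [h1]
      simp only [List.zip_nil_left, altGo, Bool.false_eq_true, false_iff]
      rintro ⟨k, hk1, hk2, _⟩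
      omega
  | succ t ih =>
      intro j hj
      by_cases h : n + j < l.length
      · have h1 : l.drop (n+j) = l[n+j]'h :: l.drop (n+j+1) :=
          List.drop_eq_getElem_cons h
        have h2 : l.drop j = l[j]'(by omega) :: l.drop (j+1) :=
          List.drop_eq_getElem_cons (by omega)
        rw [h1, h2, List.zip_cons_cons]
        show altGo need _ _ = true ↔ _
        rw [altGo]
        rw [← h2]
        rw [window_step l n j h]
        have harr : l.drop (n+(j+1)) = l.drop (n+j+1) := by ring_nf
        by_cases hw : (↑((l.drop (j+1)).take n) : Multiset Char) = need
        · rw [if_pos hw]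
          exact ⟨fun _ => ⟨j+1, by omega, by omega, hw⟩, fun _ => rfl⟩
        · rw [if_neg hw]
          have := ih (j+1) (by omega)
          rw [harr] at this
          rw [this]
          constructor
          · rintro ⟨k, hk1, hk2, hk3⟩; exact ⟨k, by omega, hk2, hk3⟩
          · rintro ⟨k, hk1, hk2, hk3⟩
            refine ⟨k, ?_, hk2, hk3⟩
            rcases Nat.lt_or_ge (j+1) k with h' | h'
            · exact h'
            · exfalso; have hkj : k = j + 1 := by omega
              subst hkj; exact hw hk3
      · have h1 : l.drop (n+j) = [] := by
          apply List.drop_eq_nil_of_le; omega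
        rw [h1]
        simp only [List.zip_nil_left, altGo, Bool.false_eq_true, false_iff]
        rintro ⟨k, hk1, hk2, _⟩
        omega

-- both sides are "some length-|a| window of b is a permutation of a"
lemma alt_iff_exists (a b : String) :
    a_is_anagram_in_b_alt a b = true
      ↔ ∃ k, k + a.toList.length ≤ b.toList.length ∧
          (↑((b.toList.drop k).take a.toList.length) : Multiset Char) = (↑a.toList : Multiset Char) := by
  unfold a_is_anagram_in_b_alt
  set n := a.toList.length with hn
  set l := b.toList with hl
  by_cases hnm : n > l.length
  · rw [if_pos hnm]
    simp only [Bool.false_eq_true, false_iff]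
    rintro ⟨k, hk, _⟩
    omega
  · rw [if_neg hnm]
    by_cases h0 : (↑(l.take n) : Multiset Char) = (↑a.toList : Multiset Char)
    · rw [if_pos h0]
      exact ⟨fun _ => ⟨0, by omega, by simpa using h0⟩, fun _ => rfl⟩
    · rw [if_neg h0]
      have hgo := altGo_spec l (↑a.toList) n l.length 0 (by omega)
      simp only [Nat.add_zero, List.drop_zero] at hgo
      rw [hgo]
      constructor
      · rintro ⟨k, _, hk2, hk3⟩; exact ⟨k, hk2, hk3⟩
      · rintro ⟨k, hk2, hk3⟩
        refine ⟨k, ?_, hk2, hk3⟩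
        rcases Nat.eq_zero_or_pos k with h' | h'
        · exfalso; subst h'; simp only [List.drop_zero] at hk3; exact h0 hk3
        · exact h'

lemma a_iff_exists (a b : String) :
    a_is_anagram_in_b a b = true
      ↔ ∃ k, k + a.toList.length ≤ b.toList.length ∧
          (↑((b.toList.drop k).take a.toList.length) : Multiset Char) = (↑a.toList : Multiset Char) := by
  simp only [a_is_anagram_in_b]
  rw [foldl_orflag]
  simp only [PySem.Str.len_eq]
  set n := a.toList.length with hn
  set l := b.toList with hl
  by_cases hnm : n ≤ l.length
  · have hb : (l.length : Int) - n + 1 = ((l.length - n + 1 : Nat) : Int) := by push_cast; omega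
    rw [hb, PySem.List.pyRange_zero_natCast]
    simp only [Bool.false_or, List.any_map, List.any_eq_true, List.mem_range, Function.comp,
      pyCompare, decide_eq_true_iff]
    constructor
    · rintro ⟨k, hk, hc⟩
      have hs : PySem.List.slice l (some ((k : Nat) : Int)) (some (((k : Nat) : Int) + (n : Int)))
          = (l.drop k).take n := by
        have hcast : (((k : Nat) : Int) + (n : Int)) = (((k + n : Nat) : Nat) : Int) := by push_cast; ring
        rw [hcast]
        exact PySem.List.slice_natCast_add ..
      rw [hs] at hc
      exact ⟨k, by omega, hc.symm⟩
    · rintro ⟨k, hk, hc⟩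
      refine ⟨k, by omega, ?_⟩
      have hs : PySem.List.slice l (some ((k : Nat) : Int)) (some (((k : Nat) : Int) + (n : Int)))
          = (l.drop k).take n := by
        have hcast : (((k : Nat) : Int) + (n : Int)) = (((k + n : Nat) : Nat) : Int) := by push_cast; ring
        rw [hcast]
        exact PySem.List.slice_natCast_add ..
      rw [hs]
      exact hc.symm
  · have hb : (l.length : Int) - n + 1 ≤ 0 := by omega
    rw [PySem.List.pyRange_one_eq_nil hb]
    simp only [List.any_nil, Bool.or_false, Bool.false_eq_true, false_iff]
    rintro ⟨k, hk, _⟩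
    omega

-- ===== VERDICT (by name: the statement is the Claim_ definition above) =====
theorem a_is_anagram_in_b_spec : Claim_equal_a_is_anagram_in_b := by
  intro a b _
  unfold Spec_a_is_anagram_in_b
  exact Bool.coe_iff_coe.mp ((a_iff_exists a b).trans (alt_iff_exists a b).symm)
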